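-- pv_equiv track=rewrite | github.com/barrachi/qtarmsim | qtarmsim/window/br.py | escribe_hex
-- ===== SOURCE A (Python) =====
-- def escribe_hex (hx):
--     lst='0x'
--     uno=['x']
--     dos=['0']
--     if hx[0] not in dos:
--         for i in range(8-len(hx)):
--             lst=lst+'0'
--         lst=lst+hx[0]
--         if len(hx)>1:
--             lst=lst+hx[1]
--     else:
--         if len(hx)==1:
--             for n in range(9-len(hx)):
--                 lst=lst+'0'
--         if len(hx)>1:
--             if hx[1] in uno:
--                 for j in range(10-len(hx)):
--                     lst=lst+'0'
--             else:
--                 for j in range(8-len(hx)):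
--                     lst=lst+'0'
--                 lst=lst+hx[0]+hx[1]
--     if len(hx)>2:
--         for m in range (len(hx)-2):
--             lst=lst+hx[(m+2)]
--     return lst
-- ===== SOURCE B (Python) =====
-- def escribe_hex(hx):
--     digits = hx[2:] if hx.startswith('0x') else hx
--     return '0x' + digits.rjust(8, '0')
-- ===== Notes on version B (the rewrite author's own statement) =====
-- stated objective: simpler
-- what changed: Replaces A's four intertwined branches with five separate character-by-character zero-padding loops by a single prefix-strip ('0x' removed if present) followed by one left-pad to 8 digits.
import Mathlib
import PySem

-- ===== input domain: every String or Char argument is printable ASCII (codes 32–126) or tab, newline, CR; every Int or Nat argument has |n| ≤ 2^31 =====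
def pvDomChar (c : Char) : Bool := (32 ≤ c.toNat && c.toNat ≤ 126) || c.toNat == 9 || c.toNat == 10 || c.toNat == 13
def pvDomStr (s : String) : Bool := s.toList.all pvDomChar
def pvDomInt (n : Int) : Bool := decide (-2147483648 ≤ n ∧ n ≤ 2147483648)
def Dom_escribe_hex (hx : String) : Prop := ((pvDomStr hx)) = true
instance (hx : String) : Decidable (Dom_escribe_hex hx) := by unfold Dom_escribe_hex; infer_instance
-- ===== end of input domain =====

-- B replaces A's five zero-counting loops and four intertwined branches by one '0x'-prefix strip plus one left-pad to 8 digits (objective: simpler).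

-- ===== PORT A =====
def escribe_hex (hx : String) : String :=
  let h := hx.toList
  match PySem.List.pyGet? h 0 with
  | none => ""   -- hx[0] raises IndexError here; excluded by Pre_
  | some c0 =>
    let L : Int := h.length
    let lst : List Char := ['0', 'x']
    let lst :=
      if c0 ∉ ['0'] then
        let lst := (PySem.List.pyRange 0 (8 - L) 1).foldl (fun a _ => a ++ ['0']) lst
        let lst := lst ++ [c0]
        if L > 1 then lst ++ [PySem.List.pyGetD h 1 ' '] else lst
      else
        let lst := if L = 1 then (PySem.List.pyRange 0 (9 - L) 1).foldl (fun a _ => a ++ ['0']) lst else lst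
        if L > 1 then
          if PySem.List.pyGetD h 1 ' ' ∈ ['x'] then
            (PySem.List.pyRange 0 (10 - L) 1).foldl (fun a _ => a ++ ['0']) lst
          else
            ((PySem.List.pyRange 0 (8 - L) 1).foldl (fun a _ => a ++ ['0']) lst) ++ [c0, PySem.List.pyGetD h 1 ' ']
        else lst
    let lst := if L > 2 then (PySem.List.pyRange 0 (L - 2) 1).foldl (fun a m => a ++ [PySem.List.pyGetD h (m + 2) ' ']) lst else lst
    String.ofList lst

-- ===== PORT B =====
def escribe_hex_alt (hx : String) : String :=
  let h := hx.toList
  let digits := if h.take 2 = ['0', 'x'] then h.drop 2 else h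
  String.ofList (['0', 'x'] ++ List.replicate (8 - digits.length) '0' ++ digits)

-- ===== PRECONDITION & SPEC =====
-- Pre_ excludes only the empty string, on which A raises IndexError at hx[0].
def Pre_escribe_hex (hx : String) : Prop := hx ≠ ""
instance (hx : String) : Decidable (Pre_escribe_hex hx) := by unfold Pre_escribe_hex; infer_instance
def pvWitness_escribe_hex : String := "1f"

def Spec_escribe_hex (hx : String) (out : String) : Prop := out = escribe_hex_alt hx
instance (hx : String) (out : String) : Decidable (Spec_escribe_hex hx out) := by unfold Spec_escribe_hex; infer_instance

-- ===== CLAIM (what is proved, stated in full; the proofs are below) =====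
def Claim_equal_escribe_hex : Prop := ∀ (hx : String), Dom_escribe_hex hx → Pre_escribe_hex hx → Spec_escribe_hex hx (escribe_hex hx)

-- ===== LEMMAS AND PROOFS =====

-- A's final loop (already reshaped by simp into flatten-of-map) appends hx[2:].
theorem tail_loop (h : List Char) :
    (List.map (fun m => [PySem.List.pyGetD h (m + 2) ' ']) (PySem.List.pyRange 0 ((h.length : Int) - 2) 1)).flatten = h.drop 2 := by
  have fl : ∀ (g : Int → Char) (l : List Int), (l.map (fun m => [g m])).flatten = l.map g := by
    intro g l; induction l <;> simp [*]
  rw [fl]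
  have key := PySem.List.map_pyGetD_pyRange h ' ' (a := 2) (by omega)
  rw [show ((2:Int).toNat) = 2 from rfl] at key
  rw [← key]
  simp only [PySem.List.pyRange_one, List.map_map, PySem.List.len, sub_zero]
  apply List.map_congr_left
  intro k _
  simp [add_comm]

-- ===== VERDICT (by name: the statement is the Claim_ definition above) =====
theorem escribe_hex_spec : Claim_equal_escribe_hex := by
  intro hx _ hpre
  unfold Spec_escribe_hex
  obtain ⟨c0, t, e⟩ : ∃ c0 t, hx.toList = c0 :: t := by
    cases e : hx.toList with
    | nil => exact absurd (by simpa using congrArg String.ofList e) hpre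
    | cons a b => exact ⟨a, b, rfl⟩
  unfold escribe_hex escribe_hex_alt
  rw [e]
  simp only [PySem.List.pyGet?, PySem.List.pyIdx?]
  norm_num
  have tl := tail_loop (c0 :: t)
  simp only [List.length_cons] at tl
  push_cast at tl ⊢
  rw [tl]
  have g1 : ∀ (a b : Char) (u : List Char), PySem.List.pyGetD (a :: b :: u) 1 ' ' = b := by
    intro a b u
    rw [PySem.List.pyGetD_ofNat' (a :: b :: u) 1 ' ']
    simp
  by_cases hc0 : c0 = '0'
  · subst hc0
    cases t with
    | nil => simp
    | cons c1 u =>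
      by_cases hc1 : c1 = 'x'
      · subst hc1
        rw [g1]
        cases u with
        | nil => simp
        | cons c2 v =>
          have e1 : (10 - (((v.length : Int)) + 1 + 1 + 1)).toNat = 7 - v.length := by omega
          simp [e1]
      · rw [g1]
        cases u with
        | nil => simp [hc1]
        | cons c2 v =>
          have e1 : (8 - (((v.length : Int)) + 1 + 1 + 1)).toNat = 5 - v.length := by omega
          simp [hc1, e1]
  · cases t with
    | nil => simp [hc0]
    | cons c1 u =>
      rw [g1]
      cases u with
      | nil => simp [hc0]
      | cons c2 v =>
        have e1 : (8 - (((v.length : Int)) + 1 + 1 + 1)).toNat = 5 - v.length := by omega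
        simp [hc0, e1]
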